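-- pv_equiv track=rewrite | github.com/christinaxu10/dj-markov | main.py | transpose_chord
-- ===== SOURCE A (Python) =====
-- keys_list = ["C", "Cs", "D", "Ds", "E", "F", "Fs", "G", "Gs", "A", "As", "B"]
--
-- def transpose_chord(chord: str, variation: int) -> str:
--     # Find the base note and suffix
--     for note in keys_list:
--         if chord.startswith(note):
--             suffix = chord.removeprefix(note)
--             idx = keys_list.index(note)
--             new_note = keys_list[(idx + variation) % 12]
--             return new_note + suffix
--     return chord  # If not found, return as is
-- ===== SOURCE B (Python) =====
-- NAMES = "C CsD DsE F FsG GsA AsB "  # 12 two-char cells (name padded with a space)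
--
-- def transpose_chord(chord: str, variation: int) -> str:
--     if not chord or not ('A' <= chord[0] <= 'G'):
--         return chord
--     d = (ord(chord[0]) - ord('C')) % 7        # position of the letter in the cycle C,D,E,F,G,A,B
--     semitone = 2 * d - (1 if d >= 3 else 0)   # chromatic index of the natural note, by formula
--     j = (semitone + variation) % 12
--     return NAMES[2 * j:2 * j + 2].rstrip() + chord[1:]
-- ===== Notes on version B (the rewrite author's own statement) =====
-- stated objective: alternative
-- what changed: Replaced the 12-entry prefix-scan over keys_list (startswith/removeprefix/.index and a list lookup) by pure character arithmetic: the root's chromatic index is computed by the closed formula 2*((ord(c)-ord('C'))%7) minus a correction, and the output name is cut out of one packed 24-character string by slice arithmetic; no note table is scanned or indexed at all.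
import Mathlib
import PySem

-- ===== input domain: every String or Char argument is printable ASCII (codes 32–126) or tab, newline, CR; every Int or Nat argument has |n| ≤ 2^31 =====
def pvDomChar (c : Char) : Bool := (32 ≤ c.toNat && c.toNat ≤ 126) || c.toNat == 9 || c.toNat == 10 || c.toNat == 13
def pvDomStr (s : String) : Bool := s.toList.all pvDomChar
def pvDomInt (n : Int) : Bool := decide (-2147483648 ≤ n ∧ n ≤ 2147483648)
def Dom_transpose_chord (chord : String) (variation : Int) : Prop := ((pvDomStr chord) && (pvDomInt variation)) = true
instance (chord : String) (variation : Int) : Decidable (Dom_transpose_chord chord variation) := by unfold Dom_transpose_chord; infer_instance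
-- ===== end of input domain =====

-- B replaces A's 12-entry prefix-scan with character arithmetic (a closed formula for the root's
-- chromatic index) plus a fixed-width slice of one packed name string (alternative; return value only).

-- ===== PORT A =====
def pvKeys : List (List Char) :=
  [['C'], ['C','s'], ['D'], ['D','s'], ['E'], ['F'], ['F','s'], ['G'], ['G','s'], ['A'], ['A','s'], ['B']]

-- the 'for note in keys_list' loop, step for step
def pvLoopA (cs : List Char) (variation : Int) : List (List Char) → List Char
  | [] => cs                                   -- loop fell through: return chord
  | note :: rest =>
    if PySem.Chars.startswith cs note then
      -- chord.removeprefix(note): exact here since the prefix matches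
      let suffix := cs.drop note.length
      -- keys_list.index(note): note ∈ pvKeys in every call, so index? is some; getD 0 never used
      let idx : Int := ((PySem.List.index? pvKeys note).getD 0 : Nat)
      -- keys_list[(idx + variation) % 12]: mod 12 always in range, so the default is never used
      let newNote := PySem.List.pyGetD pvKeys (PySem.Int.mod (idx + variation) 12) []
      newNote ++ suffix
    else pvLoopA cs variation rest

def transpose_chord (chord : String) (variation : Int) : String :=
  String.ofList (pvLoopA chord.toList variation pvKeys)

-- ===== PORT B =====
-- NAMES = "C CsD DsE F FsG GsA AsB "
def pvNames : List Char := "C CsD DsE F FsG GsA AsB ".toList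

def transpose_chord_alt (chord : String) (variation : Int) : String :=
  match chord.toList with
  | [] => chord                                -- 'not chord'
  | c :: rest =>
    if 'A' ≤ c ∧ c ≤ 'G' then
      let d := PySem.Int.mod ((c.toNat : Int) - 67) 7        -- (ord(c) - ord('C')) % 7
      let semitone := 2 * d - (if 3 ≤ d then 1 else 0)
      let j := PySem.Int.mod (semitone + variation) 12
      String.ofList (PySem.Chars.rstrip (PySem.List.slice pvNames (some (2*j)) (some (2*j + 2))) ++ rest)
    else chord

-- ===== PRECONDITION & SPEC =====
def Spec_transpose_chord (chord : String) (variation : Int) (out : String) : Prop := out = transpose_chord_alt chord variation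
instance (chord : String) (variation : Int) (out : String) : Decidable (Spec_transpose_chord chord variation out) := by unfold Spec_transpose_chord; infer_instance

-- ===== CLAIM =====
def Claim_equal_transpose_chord : Prop := ∀ (chord : String) (variation : Int), Dom_transpose_chord chord variation → Spec_transpose_chord chord variation (transpose_chord chord variation)

-- ===== LEMMAS AND PROOFS =====

-- the packed-string cell at index m spells keys_list[m]
lemma pv_names_cell (m : Int) (h0 : 0 ≤ m) (h1 : m < 12) :
    String.ofList (PySem.List.pyGetD pvKeys m []) =
    String.ofList (PySem.Chars.rstrip (PySem.List.slice pvNames (some (2*m)) (some (2*m + 2)))) := by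
  interval_cases m <;> decide

lemma pv_char_toNat_inj {a b : Char} (h : a.toNat = b.toNat) : a = b := by
  apply Char.ext
  exact UInt32.toNat_inj.mp h

-- a character in 'A'..'G' is one of the seven note letters
lemma pv_not_note {c : Char} (hC : c ≠ 'C') (hD : c ≠ 'D') (hE : c ≠ 'E') (hF : c ≠ 'F')
    (hG : c ≠ 'G') (hA : c ≠ 'A') (hB : c ≠ 'B') : ¬ ('A' ≤ c ∧ c ≤ 'G') := by
  rintro ⟨h1, h2⟩
  have h1' : (65 : Nat) ≤ c.toNat := h1
  have h2' : c.toNat ≤ (71 : Nat) := h2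
  have eA : c.toNat ≠ 65 := fun h => hA (pv_char_toNat_inj h)
  have eB : c.toNat ≠ 66 := fun h => hB (pv_char_toNat_inj h)
  have eC : c.toNat ≠ 67 := fun h => hC (pv_char_toNat_inj h)
  have eD : c.toNat ≠ 68 := fun h => hD (pv_char_toNat_inj h)
  have eE : c.toNat ≠ 69 := fun h => hE (pv_char_toNat_inj h)
  have eF : c.toNat ≠ 70 := fun h => hF (pv_char_toNat_inj h)
  have eG : c.toNat ≠ 71 := fun h => hG (pv_char_toNat_inj h)
  omega

-- ===== VERDICT =====
set_option maxRecDepth 10000 in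
theorem transpose_chord_spec : Claim_equal_transpose_chord := by
  intro chord variation _
  unfold Spec_transpose_chord transpose_chord transpose_chord_alt
  rcases h : chord.toList with _ | ⟨c, rest⟩
  · simp [pvLoopA, pvKeys, PySem.Chars.startswith]
    have h2 : String.ofList chord.toList = chord := String.ofList_toList
    rw [← h2, h]
  · by_cases hC : c = 'C'
    · subst hC
      simp [pvLoopA, pvKeys, PySem.Chars.startswith, List.idxOf?, List.findIdx?, List.findIdx?.go]
      exact pv_names_cell _ (Int.emod_nonneg _ (by norm_num)) (Int.emod_lt_of_pos _ (by norm_num))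
    · by_cases hD : c = 'D'
      · subst hD
        simp [pvLoopA, pvKeys, PySem.Chars.startswith, List.idxOf?, List.findIdx?, List.findIdx?.go]
        exact pv_names_cell _ (Int.emod_nonneg _ (by norm_num)) (Int.emod_lt_of_pos _ (by norm_num))
      · by_cases hE : c = 'E'
        · subst hE
          simp [pvLoopA, pvKeys, PySem.Chars.startswith, List.idxOf?, List.findIdx?, List.findIdx?.go]
          exact pv_names_cell _ (Int.emod_nonneg _ (by norm_num)) (Int.emod_lt_of_pos _ (by norm_num))
        · by_cases hF : c = 'F'
          · subst hF
            simp [pvLoopA, pvKeys, PySem.Chars.startswith, List.idxOf?, List.findIdx?, List.findIdx?.go]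
            exact pv_names_cell _ (Int.emod_nonneg _ (by norm_num)) (Int.emod_lt_of_pos _ (by norm_num))
          · by_cases hG : c = 'G'
            · subst hG
              simp [pvLoopA, pvKeys, PySem.Chars.startswith, List.idxOf?, List.findIdx?, List.findIdx?.go]
              exact pv_names_cell _ (Int.emod_nonneg _ (by norm_num)) (Int.emod_lt_of_pos _ (by norm_num))
            · by_cases hA : c = 'A'
              · subst hA
                simp [pvLoopA, pvKeys, PySem.Chars.startswith, List.idxOf?, List.findIdx?, List.findIdx?.go]
                exact pv_names_cell _ (Int.emod_nonneg _ (by norm_num)) (Int.emod_lt_of_pos _ (by norm_num))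
              · by_cases hB : c = 'B'
                · subst hB
                  simp [pvLoopA, pvKeys, PySem.Chars.startswith, List.idxOf?, List.findIdx?, List.findIdx?.go]
                  exact pv_names_cell _ (Int.emod_nonneg _ (by norm_num)) (Int.emod_lt_of_pos _ (by norm_num))
                · have hguard : ¬ ('A' ≤ c ∧ c ≤ 'G') := pv_not_note hC hD hE hF hG hA hB
                  simp [pvLoopA, pvKeys, PySem.Chars.startswith, hguard,
                        Ne.symm hC, Ne.symm hD, Ne.symm hE, Ne.symm hF, Ne.symm hG, Ne.symm hA, Ne.symm hB]
                  have h2 : String.ofList chord.toList = chord := String.ofList_toList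
                  rw [← h2, h]
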